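-- pv_equiv track=rewrite | github.com/DanielGFisher/hostile-tweets-ex | app/processor.py | rarest_word
-- ===== SOURCE A (Python) =====
-- def rarest_word(text):
--     """
--     Find the words which appear least and return a list of them
--     """
--     words = [w.lower() for w in text.split()]
--     if not words:
--         return []
--     counts = {}
--     for word in words:
--         counts[word] = counts.get(word, 0) + 1
--     min_count = min(counts.values())
--     rare_words = [word for word, count in counts.items() if count == min_count]
--     return rare_words
-- ===== SOURCE B (Python) =====
-- def rarest_word(text):
--     """
--     Find the words which appear least and return a list of them
--     """
--     counts = {}
--     for w in text.split():
--         w = w.lower()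
--         counts[w] = counts.get(w, 0) + 1
--     if not counts:
--         return []
--     ranked = sorted(counts.items(), key=lambda item: item[1])
--     m = ranked[0][1]
--     out = []
--     for word, c in ranked:
--         if c != m:
--             break
--         out.append(word)
--     return out
-- ===== Notes on version B (the rewrite author's own statement) =====
-- stated objective: alternative
-- what changed: B sorts counts.items() stably by frequency and returns the leading run of equal-count items (loop with break), instead of computing min over counts.values() and filtering counts.items(); stability of sorted preserves first-occurrence order among the rarest words.
import Mathlib
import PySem

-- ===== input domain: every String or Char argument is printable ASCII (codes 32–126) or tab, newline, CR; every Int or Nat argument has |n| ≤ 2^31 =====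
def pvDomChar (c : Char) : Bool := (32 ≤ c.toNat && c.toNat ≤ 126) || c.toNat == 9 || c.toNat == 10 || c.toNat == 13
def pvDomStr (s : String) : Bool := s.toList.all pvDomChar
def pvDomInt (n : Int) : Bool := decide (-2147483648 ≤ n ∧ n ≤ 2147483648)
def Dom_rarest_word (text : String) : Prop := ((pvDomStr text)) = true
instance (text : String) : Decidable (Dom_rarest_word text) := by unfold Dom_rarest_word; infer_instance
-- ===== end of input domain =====

-- B sorts counts.items() stably by count and takes the leading equal-count run
-- (loop with break), instead of A's min-over-values then filter (objective: alternative).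

-- ===== PORT A =====
def rarest_word (text : String) : List String :=
  let words := (PySem.Str.split₀ text).map PySem.Str.lower
  if words = [] then []
  else
    let counts := words.foldl (fun d w => d.insert w (d.getD w 0 + 1))
      (PySem.Dict.empty : PySem.Dict String Int)
    match PySem.List.min? counts.values (fun v => v) with
    | none => []  -- unreachable: counts is nonempty when words is
    | some m => (counts.items.filter (fun p => p.2 == m)).map (·.1)

-- ===== PORT B =====
-- the 'for word, c in ranked: if c != m: break; out.append(word)' loop of Source B
def pvTakeRun (m : Int) : List (String × Int) → List String
  | [] => []
  | p :: rest => if p.2 ≠ m then [] else p.1 :: pvTakeRun m rest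

def rarest_word_alt (text : String) : List String :=
  let counts := (PySem.Str.split₀ text).foldl
      (fun d w => let w' := PySem.Str.lower w; d.insert w' (d.getD w' 0 + 1))
      (PySem.Dict.empty : PySem.Dict String Int)
  if counts.items = [] then []
  else
    let ranked := PySem.List.sorted counts.items (fun p => p.2) false
    match ranked with
    | [] => []  -- unreachable: ranked[0] exists since counts is nonempty
    | p :: rest => pvTakeRun p.2 (p :: rest)

-- ===== PRECONDITION & SPEC =====
def Spec_rarest_word (text : String) (out : List String) : Prop := out = rarest_word_alt text
instance (text : String) (out : List String) : Decidable (Spec_rarest_word text out) := by unfold Spec_rarest_word; infer_instance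

-- ===== CLAIM (what is proved, stated in full; the proofs are below) =====
def Claim_equal_rarest_word : Prop := ∀ (text : String), Dom_rarest_word text → Spec_rarest_word text (rarest_word text)

-- ===== LEMMAS AND PROOFS =====

-- insertBy puts x at one position and leaves the rest in order
theorem pv_insertBy_split {α : Type} (b : α → α → Bool) (x : α) (ys : List α) :
    ∃ l1 l2, PySem.List.insertBy b x ys = l1 ++ x :: l2 ∧ ys = l1 ++ l2 := by
  induction ys with
  | nil => exact ⟨[], [], rfl, rfl⟩
  | cons y t ih =>
    by_cases h : b x y = true
    · exact ⟨[], y :: t, by simp [PySem.List.insertBy, h], rfl⟩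
    · obtain ⟨l1, l2, h1, h2⟩ := ih
      exact ⟨y :: l1, l2, by simp [PySem.List.insertBy, h, h1], by simp [h2]⟩

-- inserting an element the filter drops leaves the filter unchanged
theorem pv_filter_insertBy_of_not {α : Type} (p : α → Bool) (b : α → α → Bool) (x : α)
    (ys : List α) (hx : p x = false) :
    (PySem.List.insertBy b x ys).filter p = ys.filter p := by
  obtain ⟨l1, l2, h1, h2⟩ := pv_insertBy_split b x ys
  rw [h1, h2]
  simp [List.filter_append, hx]

-- stability at one key value: inserting x with key x = m into a sorted list appends x
-- to the filtered-at-m sublist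
theorem pv_filter_insertBy_eq {α : Type} (key : α → Int) (m : Int) (x : α) (ys : List α)
    (hx : key x = m) (hys : ys.Pairwise (fun a b => key a ≤ key b)) :
    (PySem.List.insertBy (fun a b => decide (key a < key b)) x ys).filter (fun y => key y == m)
      = ys.filter (fun y => key y == m) ++ [x] := by
  induction ys with
  | nil => simp [PySem.List.insertBy, hx]
  | cons y t ih =>
    rcases List.pairwise_cons.1 hys with ⟨hy, ht⟩
    by_cases h : key x < key y
    · have hnil : (y :: t).filter (fun z => key z == m) = [] := by
        refine List.filter_eq_nil_iff.2 (fun z hz => ?_)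
        have hyz : key y ≤ key z := by
          rcases List.mem_cons.1 hz with hz | hz
          · exact le_of_eq (congrArg key hz.symm)
          · exact hy z hz
        have : m < key z := lt_of_lt_of_le (hx ▸ h) hyz
        simp [ne_of_gt this]
      simp only [PySem.List.insertBy, decide_eq_true_eq, if_pos h]
      simp [hx, hnil]
    · simp only [PySem.List.insertBy, decide_eq_true_eq, if_neg h]
      simp only [List.filter_cons]
      rw [ih ht]
      split <;> simp
  
-- stable sort does not change the subsequence of elements at any fixed key value
theorem pv_sorted_filter_key {α : Type} (key : α → Int) (m : Int) (xs : List α) :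
    (PySem.List.sorted xs key false).filter (fun x => key x == m)
      = xs.filter (fun x => key x == m) := by
  induction xs using List.reverseRecOn with
  | nil => rw [PySem.List.sorted_eq_foldl_insertBy]; rfl
  | append_singleton xs x ih =>
    have hfold : PySem.List.sorted (xs ++ [x]) key false
        = PySem.List.insertBy (fun a b => decide (key a < key b)) x
            (PySem.List.sorted xs key false) := by
      rw [PySem.List.sorted_eq_foldl_insertBy, PySem.List.sorted_eq_foldl_insertBy,
        List.foldl_append, List.foldl_cons, List.foldl_nil]
    rw [hfold]
    by_cases hx : key x = m
    · rw [pv_filter_insertBy_eq key m x _ hx (PySem.List.sorted_pairwise _ _), ih,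
        List.filter_append]
      simp [hx]
    · rw [pv_filter_insertBy_of_not (fun y => key y == m)
        (fun a b => decide (key a < key b)) x _ (by simp [hx]), ih, List.filter_append]
      simp [hx]

theorem pv_sorted_filter_snd (m : Int) (xs : List (String × Int)) :
    (PySem.List.sorted xs (fun p => p.2) false).filter (fun p => p.2 == m)
      = xs.filter (fun p => p.2 == m) :=
  pv_sorted_filter_key (fun p => p.2) m xs

-- B's break-loop on a key-sorted list whose keys are all ≥ m yields the filter at m
theorem pv_takeRun_eq (m : Int) (ys : List (String × Int))
    (hp : ys.Pairwise (fun a b => a.2 ≤ b.2)) (hm : ∀ y ∈ ys, m ≤ y.2) :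
    pvTakeRun m ys = (ys.filter (fun p => p.2 == m)).map (·.1) := by
  induction ys with
  | nil => rfl
  | cons y t ih =>
    rcases List.pairwise_cons.1 hp with ⟨hy, ht⟩
    by_cases hc : y.2 = m
    · rw [show pvTakeRun m (y :: t) = y.1 :: pvTakeRun m t by simp [pvTakeRun, hc],
        ih ht (fun z hz => hm z (List.mem_cons_of_mem y hz))]
      simp [hc]
    · have hlt : m < y.2 := lt_of_le_of_ne (hm y List.mem_cons_self) (Ne.symm hc)
      have hnil : t.filter (fun p => p.2 == m) = [] :=
        List.filter_eq_nil_iff.2 (fun z hz => by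
          simp [ne_of_gt (lt_of_lt_of_le hlt (hy z hz))])
      rw [show pvTakeRun m (y :: t) = [] by simp [pvTakeRun, hc]]
      simp [hc, hnil]

-- ===== VERDICT (by name: the statement is the Claim_ definition above) =====
theorem rarest_word_spec : Claim_equal_rarest_word := by
  intro text _
  unfold Spec_rarest_word
  simp only [rarest_word, rarest_word_alt]
  have hc : (PySem.Str.split₀ text).foldl
      (fun d w => let w' := PySem.Str.lower w; d.insert w' (d.getD w' 0 + 1))
      (PySem.Dict.empty : PySem.Dict String Int)
      = PySem.Dict.counter ((PySem.Str.split₀ text).map PySem.Str.lower) := by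
    rw [← PySem.Dict.foldl_insert_getD_add_one_eq_counter, List.foldl_map]
  rw [hc, PySem.Dict.foldl_insert_getD_add_one_eq_counter]
  set ws := (PySem.Str.split₀ text).map PySem.Str.lower with hws
  by_cases hw : ws = []
  · simp [hw, PySem.Dict.counter, PySem.Dict.empty]
  · have hitems : (PySem.Dict.counter ws).items ≠ [] := by
      rcases List.exists_mem_of_ne_nil ws hw with ⟨x, hx⟩
      intro hn
      rw [PySem.Dict.items_counter] at hn
      have : x ∈ PySem.Set.ofList ws := (PySem.Set.mem_ofList ws x).2 hx
      simp [List.map_eq_nil_iff.1 hn] at this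
    rw [if_neg hw, if_neg hitems]
    set items := (PySem.Dict.counter ws).items with hitemsdef
    have hvals : (PySem.Dict.counter ws).values ≠ [] := by
      intro h
      exact hitems (List.map_eq_nil_iff.1 (show items.map (·.2) = [] from h))
    obtain ⟨m, hm⟩ : ∃ m, PySem.List.min? (PySem.Dict.counter ws).values (fun v => v) = some m := by
      cases e : PySem.List.min? (PySem.Dict.counter ws).values (fun v : Int => v) with
      | none => exact absurd ((PySem.List.min?_eq_none_iff _ _).1 e) hvals
      | some m => exact ⟨m, rfl⟩
    rw [hm]
    have hvals_eq : (PySem.Dict.counter ws).values = items.map (·.2) := rfl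
    have hsne : PySem.List.sorted items (fun p => p.2) false ≠ [] := by
      intro h; exact hitems ((PySem.List.sorted_eq_nil_iff items (fun p => p.2) false).1 h)
    obtain ⟨q, rest, hq⟩ : ∃ q rest, PySem.List.sorted items (fun p => p.2) false = q :: rest := by
      cases e : PySem.List.sorted items (fun p => p.2) false with
      | nil => exact absurd e hsne
      | cons q rest => exact ⟨q, rest, rfl⟩
    rw [hq]
    -- the head of the sorted list carries the minimum count m
    have hmin_items : ∀ y ∈ items, m ≤ y.2 := by
      intro y hy
      exact PySem.List.min?_isMin hm y.2 (by rw [hvals_eq]; exact List.mem_map_of_mem hy)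
    have hq_items : q ∈ items := (PySem.List.mem_sorted items (fun p => p.2) false q).1 (hq ▸ List.mem_cons_self)
    have hmq : m = q.2 := by
      obtain ⟨p, hp, hpm⟩ : ∃ p ∈ items, p.2 = m := by
        have := PySem.List.min?_mem hm
        rw [hvals_eq] at this
        rcases List.mem_map.1 this with ⟨p, hp, hpm⟩
        exact ⟨p, hp, hpm⟩
      have h1 : q.2 ≤ m := hpm ▸ PySem.List.key_head_sorted_le items (fun p => p.2) hq p hp
      exact le_antisymm (hmin_items q hq_items) h1
    show (items.filter (fun p => p.2 == m)).map (·.1) = pvTakeRun q.2 (q :: rest)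
    rw [← hmq, ← hq,
      pv_takeRun_eq m (PySem.List.sorted items (fun p => p.2) false)
        (PySem.List.sorted_pairwise items (fun p => p.2))
        (fun y hy => hmin_items y ((PySem.List.mem_sorted items (fun p => p.2) false y).1 hy)),
      pv_sorted_filter_snd]
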